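-- pv_equiv track=rewrite | github.com/Jorzul/Babes-Bolyai-University | 1st Semester/FP/Laboratory Tests/t1-Jorzul/src/functions.py | check_for_distinct_digits
-- ===== SOURCE A (Python) =====
-- def check_for_distinct_digits(n):
--     """
--     This function checks if the computer number or the human number is a valid number.
--     (It contains only distinct digits)
--     """
--
--     n = int(n)
--     list_of_numbers = [0, 0, 0, 0, 0, 0, 0, 0, 0, 0]
--     while n > 0:
--         list_of_numbers[int(n % 10)] = list_of_numbers[int(n % 10)] + 1
--         n = n // 10
--     for i in range(len(list_of_numbers)):
--         if list_of_numbers[i] > 1: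
--             return False
--     return True
-- ===== SOURCE B (Python) =====
-- def check_for_distinct_digits(n):
--     n = int(n)
--     if n <= 0:
--         return True
--     s = str(n)
--     return len(set(s)) == len(s)
-- ===== Notes on version B (the rewrite author's own statement) =====
-- stated objective: simpler
-- what changed: Drops the digit-extraction loop and ten-slot count table entirely: B tests distinctness on the decimal string representation, returning len(set(str(n))) == len(str(n)), with non-positive n accepted explicitly exactly as A accepts them.
import Mathlib
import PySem

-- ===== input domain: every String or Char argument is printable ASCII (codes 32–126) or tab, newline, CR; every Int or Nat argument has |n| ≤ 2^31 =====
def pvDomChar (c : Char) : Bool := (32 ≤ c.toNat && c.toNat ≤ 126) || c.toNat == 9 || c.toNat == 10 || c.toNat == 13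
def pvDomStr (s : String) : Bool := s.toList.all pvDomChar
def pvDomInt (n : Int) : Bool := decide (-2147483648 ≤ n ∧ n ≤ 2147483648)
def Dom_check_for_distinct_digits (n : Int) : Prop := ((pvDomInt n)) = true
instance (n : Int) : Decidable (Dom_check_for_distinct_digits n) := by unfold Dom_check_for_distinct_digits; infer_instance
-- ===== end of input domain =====

-- B drops A's digit-extraction loop and ten-slot count table: it tests distinctness on the
-- decimal string, len(set(str(n))) == len(str(n)), accepting non-positive n explicitly as A
-- accepts them; objective: simpler.

-- ===== PORT A =====
-- the 'while n > 0' loop: list_of_numbers[n % 10] += 1; n = n // 10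
def pvALoop (n : Int) (counts : List Int) : List Int :=
  if n > 0 then
    pvALoop (PySem.Int.floordiv n 10)
      (PySem.List.pySetD counts (PySem.Int.mod n 10)
        (PySem.List.pyGetD counts (PySem.Int.mod n 10) 0 + 1))
  else counts
termination_by n.toNat
decreasing_by
  rw [PySem.Int.floordiv_eq_ediv_of_pos (by omega : (0:Int) < 10)]; omega

-- the 'for i in range(len(list_of_numbers))' loop with its early 'return False'
def pvAScan (is_ : List Int) (counts : List Int) : Bool :=
  match is_ with
  | [] => true
  | i :: rest => if PySem.List.pyGetD counts i 0 > 1 then false else pvAScan rest counts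

def check_for_distinct_digits (n : Int) : Bool :=
  pvAScan (PySem.List.pyRange 0 10 1) (pvALoop n [0, 0, 0, 0, 0, 0, 0, 0, 0, 0])

-- ===== PORT B =====
-- if n <= 0: return True;  s = str(n);  return len(set(s)) == len(s)
def check_for_distinct_digits_alt (n : Int) : Bool :=
  if n ≤ 0 then true
  else
    let s := PySem.Int.toStr n
    PySem.Set.len (PySem.Set.ofList s.toList) == PySem.Str.len s

-- ===== PRECONDITION & SPEC =====
def Spec_check_for_distinct_digits (n : Int) (out : Bool) : Prop := out = check_for_distinct_digits_alt n
instance (n : Int) (out : Bool) : Decidable (Spec_check_for_distinct_digits n out) := by unfold Spec_check_for_distinct_digits; infer_instance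

-- ===== CLAIM (what is proved, stated in full; the proofs are below) =====
def Claim_equal_check_for_distinct_digits : Prop := ∀ (n : Int), Dom_check_for_distinct_digits n → Spec_check_for_distinct_digits n (check_for_distinct_digits n)

-- ===== LEMMAS AND PROOFS =====

-- A's scan pass returns true iff every inspected slot holds at most 1
theorem pvAScan_eq (is_ counts : List Int) :
    pvAScan is_ counts = decide (∀ i ∈ is_, PySem.List.pyGetD counts i 0 ≤ 1) := by
  induction is_ with
  | nil => simp [pvAScan]
  | cons i rest ih =>
      simp only [pvAScan, ih]
      by_cases h : PySem.List.pyGetD counts i 0 > 1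
      · simp [h]
      · simp [h]; intro _; omega

-- A's counting loop computes, in slot j, the old value plus the number of
-- occurrences of digit j in the base-10 expansion
theorem pvALoop_count (m : Nat) (counts : List Int) (h10 : counts.length = 10) :
    (pvALoop (m : Int) counts).length = 10 ∧
    ∀ j : Nat, j < 10 →
      (pvALoop (m : Int) counts).getD j 0
        = counts.getD j 0 + ((Nat.digits 10 m).count j : Int) := by
  induction m using Nat.strong_induction_on generalizing counts with
  | _ m ih =>
    by_cases hm : 0 < m
    · have hpos : (m : Int) > 0 := by exact_mod_cast hm
      rw [pvALoop]
      simp only [hpos, if_true]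
      have hmod : PySem.Int.mod (m : Int) 10 = ((m % 10 : Nat) : Int) := by
        rw [PySem.Int.mod_eq_emod_of_pos (by omega : (0:Int) < 10)]
        push_cast; rfl
      have hdiv : PySem.Int.floordiv (m : Int) 10 = ((m / 10 : Nat) : Int) := by
        rw [PySem.Int.floordiv_eq_ediv_of_pos (by omega : (0:Int) < 10)]
        push_cast; rfl
      rw [hmod, hdiv]
      set counts' := PySem.List.pySetD counts ((m % 10 : Nat) : Int)
        (PySem.List.pyGetD counts ((m % 10 : Nat) : Int) 0 + 1) with hc'
      have hc'eq : counts' = counts.set (m % 10) (counts.getD (m % 10) 0 + 1) := by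
        rw [hc', PySem.List.pySetD_natCast, PySem.List.pyGetD_natCast]
      have hlen' : counts'.length = 10 := by rw [hc'eq, List.length_set, h10]
      obtain ⟨hlenr, hcount⟩ := ih (m / 10) (Nat.div_lt_self hm (by omega)) counts' hlen'
      refine ⟨hlenr, ?_⟩
      intro j hj
      rw [hcount j hj]
      rw [Nat.digits_def' (by omega : 1 < 10) hm]
      rw [List.count_cons]
      have hget : counts'.getD j 0
          = counts.getD j 0 + (if j = m % 10 then 1 else 0) := by
        rw [hc'eq]
        rcases eq_or_ne j (m % 10) with he | he
        · subst he
          rw [List.getD_eq_getElem _ _ (by rw [List.length_set, h10]; omega)]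
          rw [List.getElem_set_self]
          rw [if_pos rfl, List.getD_eq_getElem _ _ (by omega)]
        · have hne : m % 10 ≠ j := fun h => he h.symm
          have hjl : j < counts.length := by omega
          rw [if_neg he, add_zero,
              List.getD_eq_getElem _ _ (by rw [List.length_set]; omega),
              List.getD_eq_getElem _ _ hjl,
              List.getElem_set_ne hne]
      rw [hget]
      rcases eq_or_ne j (m % 10) with he | he
      · simp [he]; ring
      · have : ¬ (m % 10 = j) := fun h => he h.symm
        simp [he, this]
    · have : ¬ ((m : Int) > 0) := by omega
      rw [pvALoop]
      simp only [this, if_false]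
      have hm0 : m = 0 := by omega
      subst hm0
      exact ⟨h10, fun j hj => by simp⟩

-- A returns true iff every digit 0..9 occurs at most once in the expansion of n.toNat
theorem checkA_iff (n : Int) (hn : 0 ≤ n) :
    check_for_distinct_digits n = true ↔ (Nat.digits 10 n.toNat).Nodup := by
  unfold check_for_distinct_digits
  obtain ⟨hlen, hcount⟩ := pvALoop_count n.toNat
    [0, 0, 0, 0, 0, 0, 0, 0, 0, 0] (by decide)
  rw [Int.toNat_of_nonneg hn] at hlen hcount
  rw [pvAScan_eq, decide_eq_true_iff]
  constructor
  · intro h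
    rw [List.nodup_iff_count_le_one]
    intro a
    by_cases ha : a < 10
    · have hmem : (a : Int) ∈ PySem.List.pyRange 0 10 1 := by
        rw [PySem.List.mem_pyRange_one]; constructor <;> omega
      have hz : ([0, 0, 0, 0, 0, 0, 0, 0, 0, 0] : List Int).getD a 0 = 0 := by
        interval_cases a <;> rfl
      have := h _ hmem
      rw [PySem.List.pyGetD_natCast, hcount a ha, hz] at this
      omega
    · have : a ∉ Nat.digits 10 n.toNat := fun hmem =>
        absurd (Nat.digits_lt_base (by omega) hmem) (by omega)
      rw [List.count_eq_zero_of_not_mem this]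
      omega
  · intro h i hi
    rw [PySem.List.mem_pyRange_one] at hi
    have h0 : 0 ≤ i := hi.1
    have hi10 : i < 10 := hi.2
    have : i = ((i.toNat : Nat) : Int) := by omega
    rw [this, PySem.List.pyGetD_natCast, hcount i.toNat (by omega)]
    have hz : ([0, 0, 0, 0, 0, 0, 0, 0, 0, 0] : List Int).getD i.toNat 0 = 0 := by
      have : i.toNat < 10 := by omega
      interval_cases h' : i.toNat <;> rfl
    have := (List.nodup_iff_count_le_one.mp h) i.toNat
    rw [hz]
    omega

-- the deduplicated list is a sublist of the original
theorem ofList_sublist {α : Type} [BEq α] [LawfulBEq α] (xs : List α) :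
    (PySem.Set.ofList xs).Sublist xs := by
  induction xs using List.reverseRecOn with
  | nil => simp [PySem.Set.ofList]
  | append_singleton xs x ih =>
      rw [PySem.Set.ofList_append_singleton, PySem.Set.add_eq_ite]
      split
      · exact ih.trans (List.sublist_append_left xs [x])
      · exact ih.append_right [x]

-- len(set(xs)) == len(xs) iff xs has no duplicates
theorem ofList_length_iff {α : Type} [BEq α] [LawfulBEq α] (xs : List α) :
    (PySem.Set.ofList xs).length = xs.length ↔ xs.Nodup := by
  constructor
  · intro h
    have := (ofList_sublist xs).eq_of_length h
    rw [← this]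
    exact PySem.Set.nodup_ofList xs
  · intro h
    rw [PySem.Set.ofList_eq_self_of_nodup xs h]

-- digitChar is injective below 10
theorem digitChar_inj (a b : Nat) (ha : a < 10) (hb : b < 10)
    (h : Nat.digitChar a = Nat.digitChar b) : a = b := by
  interval_cases a <;> interval_cases b <;> simp_all [Nat.digitChar]

-- Nat.toDigits (fuel-based) agrees with Nat.digits
theorem toDigitsCore_eq_digits (fuel : Nat) :
    ∀ (m : Nat) (acc : List Char), 0 < m → m < fuel →
      Nat.toDigitsCore 10 fuel m acc
        = ((Nat.digits 10 m).map Nat.digitChar).reverse ++ acc := by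
  induction fuel with
  | zero => intro m acc _ h; omega
  | succ f ih =>
      intro m acc hm hlt
      rw [Nat.toDigitsCore]
      rw [Nat.digits_def' (by omega : 1 < 10) hm]
      by_cases hd : m / 10 = 0
      · rw [if_pos hd, hd]
        simp
      · rw [if_neg hd]
        have h1 : 0 < m / 10 := Nat.pos_of_ne_zero hd
        have h2 : m / 10 < f :=
          Nat.lt_of_lt_of_le (Nat.div_lt_self hm (by norm_num)) (Nat.le_of_lt_succ hlt)
        rw [ih (m / 10) (Nat.digitChar (m % 10) :: acc) h1 h2]
        simp

theorem toChars_pos (n : Int) (hn : 0 < n) :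
    PySem.Int.toChars n = ((Nat.digits 10 n.toNat).map Nat.digitChar).reverse := by
  unfold PySem.Int.toChars
  rw [if_neg (by omega)]
  unfold Nat.toDigits
  rw [toDigitsCore_eq_digits (n.toNat + 1) n.toNat [] (by omega) (by omega)]
  simp

-- B returns true iff the digits of n are pairwise distinct (for positive n)
theorem checkB_iff (n : Int) (hn : 0 < n) :
    check_for_distinct_digits_alt n = true ↔ (Nat.digits 10 n.toNat).Nodup := by
  unfold check_for_distinct_digits_alt
  rw [if_neg (by omega)]
  simp only [beq_iff_eq, PySem.Set.len, PySem.Str.len_eq]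
  rw [PySem.Int.toList_toStr]
  rw [Nat.cast_inj]
  rw [ofList_length_iff]
  rw [toChars_pos n hn]
  rw [List.nodup_reverse]
  constructor
  · exact fun h => h.of_map
  · intro h
    refine h.map_on ?_
    intro a hamem b hbmem hab
    exact digitChar_inj a b (Nat.digits_lt_base (by omega) hamem)
      (Nat.digits_lt_base (by omega) hbmem) hab

-- ===== VERDICT (by name: the statement is the Claim_ definition above) =====
theorem check_for_distinct_digits_spec : Claim_equal_check_for_distinct_digits := by
  intro n _
  show check_for_distinct_digits n = check_for_distinct_digits_alt n
  by_cases hn : 0 < n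
  · have hA := checkA_iff n (le_of_lt hn)
    have hB := checkB_iff n hn
    cases hBv : check_for_distinct_digits_alt n
    · rw [hBv] at hB
      cases hAv : check_for_distinct_digits n
      · rfl
      · rw [hAv] at hA
        exact absurd (hA.mp rfl) (fun h => by simp at hB; exact hB h)
    · rw [hBv] at hB
      exact hA.mpr (hB.mp rfl)
  · unfold check_for_distinct_digits check_for_distinct_digits_alt
    rw [pvALoop]
    rw [if_neg (by omega), if_pos (by omega)]
    decide
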